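-- pv_equiv track=rewrite | github.com/cheng-wei-huang0612/Falcon_KeyGen | Size_estimation/Poly.py | Linear_Conv
-- ===== SOURCE A (Python) =====
-- def Linear_Conv(f,g,p):
--     if p != 0:
--
--         n = len(f)
--         result = [0]*(2*n-1)
--         for i in range(n):
--             for j in range(n):
--                 result[i+j] += (f[i]*g[j] % p)
--         return result
--
--     else:
--
--         n = len(f)
--         result = [0]*(2*n-1)
--         for i in range(n):
--             for j in range(n):
--                 result[i+j] += (f[i]*g[j])
--         return result
-- ===== SOURCE B (Python) =====
-- def Linear_Conv(f, g, p):
--     n = len(f)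
--     if n == 0:
--         return []
--     def rec(lo, hi):
--         # convolution of f[lo:hi] with g[0:n] (term-wise mod when p != 0),
--         # placed at offset 0; length (hi-lo)+n-1
--         if hi - lo <= 1:
--             if p != 0:
--                 return [f[lo] * g[j] % p for j in range(n)]
--             else:
--                 return [f[lo] * g[j] for j in range(n)]
--         mid = (lo + hi) // 2
--         out = rec(lo, mid) + [0] * (hi - mid)
--         off = mid - lo
--         for t, v in enumerate(rec(mid, hi)):
--             out[off + t] += v
--         return out
--     return rec(0, n)
-- ===== Notes on version B (the rewrite author's own statement) =====
-- stated objective: alternative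
-- what changed: Replaces A's flat nested scatter loops (result[i+j] += term) with a divide-and-conquer recursion: f is split in halves, each half convolved with g recursively, and the two partial results combined by a shifted vector addition.
import Mathlib
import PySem

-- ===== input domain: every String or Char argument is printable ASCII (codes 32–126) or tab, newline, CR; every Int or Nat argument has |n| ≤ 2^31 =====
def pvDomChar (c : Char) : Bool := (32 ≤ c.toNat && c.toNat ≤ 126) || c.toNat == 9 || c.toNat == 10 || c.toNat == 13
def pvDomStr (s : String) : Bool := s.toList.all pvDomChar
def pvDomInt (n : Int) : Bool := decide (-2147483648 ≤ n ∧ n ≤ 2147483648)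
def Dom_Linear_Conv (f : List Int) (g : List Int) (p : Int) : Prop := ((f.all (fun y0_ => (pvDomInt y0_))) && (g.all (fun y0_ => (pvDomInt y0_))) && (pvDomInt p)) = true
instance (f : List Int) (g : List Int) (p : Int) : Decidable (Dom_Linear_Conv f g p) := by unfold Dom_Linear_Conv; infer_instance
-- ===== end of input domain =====

-- B replaces A's flat nested scatter loops by a divide-and-conquer recursion on halves
-- of f, combining partial results by shifted vector addition (objective: alternative).

-- ===== PORT A =====
-- A: nested scatter loops; result[i+j] += f[i]*g[j] % p (resp. without % p).
-- Under Pre_ every index access is in range, so getD with default 0 is exact here.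
def Linear_Conv (f : List Int) (g : List Int) (p : Int) : List Int :=
  if p ≠ 0 then
    let n := f.length
    (List.range n).foldl (fun result i =>
      (List.range n).foldl (fun result j =>
        result.set (i + j)
          (result.getD (i + j) 0 + PySem.Int.mod (f.getD i 0 * g.getD j 0) p)) result)
      (List.replicate (2 * n - 1) 0)
  else
    let n := f.length
    (List.range n).foldl (fun result i =>
      (List.range n).foldl (fun result j =>
        result.set (i + j)
          (result.getD (i + j) 0 + f.getD i 0 * g.getD j 0)) result)
      (List.replicate (2 * n - 1) 0)

-- ===== PORT B =====
-- the 'for t, v in enumerate(rec(mid, hi)): out[off+t] += v' loop of Source B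
def pvAddAt : List Int → Nat → List Int → List Int
  | r, _, [] => r
  | r, off, v :: b => pvAddAt (r.set off (r.getD off 0 + v)) (off + 1) b

-- Source B's rec(lo, hi): divide and conquer on the index range [lo, hi) of f
def pvRec (f g : List Int) (p : Int) (n lo hi : Nat) : List Int :=
  if hi - lo ≤ 1 then
    if p ≠ 0 then
      (List.range n).map (fun j => PySem.Int.mod (f.getD lo 0 * g.getD j 0) p)
    else
      (List.range n).map (fun j => f.getD lo 0 * g.getD j 0)
  else
    let mid := (lo + hi) / 2
    pvAddAt (pvRec f g p n lo mid ++ List.replicate (hi - mid) 0) (mid - lo)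
      (pvRec f g p n mid hi)
termination_by hi - lo
decreasing_by all_goals omega

def Linear_Conv_alt (f : List Int) (g : List Int) (p : Int) : List Int :=
  let n := f.length
  if n = 0 then [] else pvRec f g p n 0 n

-- ===== PRECONDITION & SPEC =====
-- Pre_ excludes exactly the inputs where Python A raises IndexError: g shorter than f
-- (g[j] is read for j up to len(f)-1).
def Pre_Linear_Conv (f : List Int) (g : List Int) (p : Int) : Prop :=
  f.length ≤ g.length
instance (f : List Int) (g : List Int) (p : Int) : Decidable (Pre_Linear_Conv f g p) := by unfold Pre_Linear_Conv; infer_instance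

def pvWitness_Linear_Conv : List Int × List Int × Int := ([1, -2, 3], [4, 0, 5], 7)

def Spec_Linear_Conv (f : List Int) (g : List Int) (p : Int) (out : List Int) : Prop := out = Linear_Conv_alt f g p
instance (f : List Int) (g : List Int) (p : Int) (out : List Int) : Decidable (Spec_Linear_Conv f g p out) := by unfold Spec_Linear_Conv; infer_instance

-- ===== CLAIM (what is proved, stated in full; the proofs are below) =====
def Claim_equal_Linear_Conv : Prop := ∀ (f : List Int) (g : List Int) (p : Int), Dom_Linear_Conv f g p → Pre_Linear_Conv f g p → Spec_Linear_Conv f g p (Linear_Conv f g p)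

-- ===== LEMMAS AND PROOFS =====

-- the per-product term both programs accumulate
def pvTerm (f g : List Int) (p : Int) (i j : Nat) : Int :=
  if p ≠ 0 then PySem.Int.mod (f.getD i 0 * g.getD j 0) p else f.getD i 0 * g.getD j 0

theorem pv_getD_set (l : List Int) (m k : Nat) (v : Int) :
    (l.set m v).getD k 0 = if m = k ∧ k < l.length then v else l.getD k 0 := by
  simp [List.getD_eq_getElem?_getD, List.getElem?_set]
  split_ifs with h1 h2 <;> simp_all

-- ---- A-side lemmas: characterise the scatter at each index ----

theorem pv_inner_len (t : Nat → Nat → Int) (i : Nat) (js : List Nat) (res : List Int) :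
    (js.foldl (fun r j => r.set (i + j) (r.getD (i + j) 0 + t i j)) res).length = res.length := by
  induction js generalizing res with
  | nil => rfl
  | cons j js ih => rw [List.foldl_cons, ih, List.length_set]

theorem pv_inner_getD (t : Nat → Nat → Int) (i : Nat) (js : List Nat) (res : List Int) (k : Nat) :
    (js.foldl (fun r j => r.set (i + j) (r.getD (i + j) 0 + t i j)) res).getD k 0
      = res.getD k 0 + (js.map (fun j => if i + j = k ∧ k < res.length then t i j else 0)).sum := by
  induction js generalizing res with
  | nil => simp
  | cons j js ih =>
    simp only [List.foldl_cons, List.map_cons, List.sum_cons]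
    rw [ih, pv_getD_set, List.length_set]
    split_ifs with h
    · rw [h.1]; ring
    · ring

theorem pv_outer_getD (t : Nat → Nat → Int) (is js : List Nat) (res : List Int) (k : Nat) :
    (is.foldl (fun r i => js.foldl (fun r j => r.set (i + j) (r.getD (i + j) 0 + t i j)) r) res).getD k 0
      = res.getD k 0
        + (is.map (fun i => (js.map (fun j => if i + j = k ∧ k < res.length then t i j else 0)).sum)).sum := by
  induction is generalizing res with
  | nil => simp
  | cons i is ih =>
    simp only [List.foldl_cons, List.map_cons, List.sum_cons]
    rw [ih, pv_inner_getD, pv_inner_len]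
    ring

theorem pv_outer_len (t : Nat → Nat → Int) (is js : List Nat) (res : List Int) :
    (is.foldl (fun r i => js.foldl (fun r j => r.set (i + j) (r.getD (i + j) 0 + t i j)) r) res).length = res.length := by
  induction is generalizing res with
  | nil => rfl
  | cons i is ih => rw [List.foldl_cons, ih, pv_inner_len]

-- one diagonal: summing [i+j=k] over j < n picks the single term j = k-i
theorem pv_diag (u : Nat → Int) (i k n : Nat) :
    ((List.range n).map (fun j => if i + j = k then u j else 0)).sum
      = if i ≤ k ∧ k - i < n then u (k - i) else 0 := by
  induction n with
  | zero =>
    simp only [List.range_zero, List.map_nil, List.sum_nil]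
    rw [if_neg (by omega)]
  | succ n ih =>
    rw [List.range_succ, List.map_append, List.sum_append, ih]
    simp only [List.map_cons, List.map_nil, List.sum_cons, List.sum_nil]
    by_cases h1 : i ≤ k ∧ k - i < n
    · have hne : ¬ (i + n = k) := by omega
      rw [if_pos h1, if_neg hne, if_pos (show i ≤ k ∧ k - i < n + 1 by omega)]; ring
    · rw [if_neg h1]
      by_cases h2 : i + n = k
      · have hki : k - i = n := by omega
        rw [if_pos h2, if_pos (show i ≤ k ∧ k - i < n + 1 by omega), hki]; ring
      · rw [if_neg h2, if_neg (show ¬ (i ≤ k ∧ k - i < n + 1) by omega)]; ring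

-- A's scatter at index k < 2n-1 is the diagonal sum
theorem pv_mainA (t : Nat → Nat → Int) (n k : Nat) (hk : k < 2 * n - 1) :
    ((List.range n).foldl (fun r i => (List.range n).foldl
        (fun r j => r.set (i + j) (r.getD (i + j) 0 + t i j)) r)
      (List.replicate (2 * n - 1) (0 : Int))).getD k 0
      = ((List.range n).map (fun i => if i ≤ k ∧ k - i < n then t i (k - i) else 0)).sum := by
  rw [pv_outer_getD]
  simp only [List.length_replicate]
  rw [List.getD_eq_getElem?_getD]
  simp only [List.getElem?_replicate, if_pos hk, Option.getD_some]
  rw [zero_add]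
  apply congrArg
  apply List.map_congr_left
  intro i _
  have : (fun j => if i + j = k ∧ k < 2 * n - 1 then t i j else 0)
      = (fun j => if i + j = k then t i j else 0) := by
    funext j
    by_cases h : i + j = k
    · rw [if_pos ⟨h, hk⟩, if_pos h]
    · rw [if_neg (by tauto), if_neg h]
  rw [this, pv_diag]

-- ---- B-side lemmas ----

theorem pv_addAt_len (b : List Int) : ∀ (r : List Int) (off : Nat),
    (pvAddAt r off b).length = r.length := by
  induction b with
  | nil => intro r off; rfl
  | cons v b ih => intro r off; rw [pvAddAt, ih, List.length_set]

theorem pv_addAt_getD (b : List Int) : ∀ (r : List Int) (off k : Nat),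
    (pvAddAt r off b).getD k 0
      = r.getD k 0 + (if off ≤ k ∧ k - off < b.length ∧ k < r.length then b.getD (k - off) 0 else 0) := by
  induction b with
  | nil => intro r off k; simp [pvAddAt]
  | cons v b ih =>
    intro r off k
    rw [pvAddAt, ih, pv_getD_set, List.length_set]
    by_cases h1 : off = k ∧ k < r.length
    · rw [if_pos h1, if_neg (by omega), if_pos (by simp; omega)]
      have hko : k - off = 0 := by omega
      rw [hko, h1.1]; simp
    · rw [if_neg h1]
      by_cases h2 : off + 1 ≤ k ∧ k - (off + 1) < b.length ∧ k < r.length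
      · rw [if_pos h2, if_pos (by simp; omega)]
        have : k - off = (k - (off + 1)) + 1 := by omega
        rw [this, List.getD_cons_succ]
      · rw [if_neg h2, if_neg (by simp; omega)]

theorem pv_getD_append_replicate (a : List Int) (m k : Nat) :
    (a ++ List.replicate m (0 : Int)).getD k 0 = a.getD k 0 := by
  rcases Nat.lt_or_ge k a.length with h | h
  · rw [List.getD_append _ _ _ _ h]
  · rw [List.getD_eq_getElem?_getD, List.getD_eq_getElem?_getD,
      List.getElem?_append_right h, List.getElem?_replicate,
      List.getElem?_eq_none h]
    split_ifs <;> simp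

theorem pv_rec_len (f g : List Int) (p : Int) (n : Nat) :
    ∀ m lo hi, hi - lo = m → lo < hi →
      (pvRec f g p n lo hi).length = (hi - lo) + n - 1 := by
  intro m
  induction m using Nat.strong_induction_on with
  | _ m ih =>
    intro lo hi hm hlt
    rw [pvRec]
    by_cases h1 : hi - lo ≤ 1
    · rw [if_pos h1]
      split_ifs <;> simp <;> omega
    · rw [if_neg h1]
      have hmid1 : lo < (lo + hi) / 2 := by omega
      have hmid2 : (lo + hi) / 2 < hi := by omega
      rw [pv_addAt_len, List.length_append, List.length_replicate,
        ih ((lo + hi) / 2 - lo) (by omega) lo ((lo + hi) / 2) rfl hmid1]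
      omega

theorem pv_rec_getD (f g : List Int) (p : Int) (n : Nat) :
    ∀ m lo hi, hi - lo = m → lo < hi → ∀ k,
      (pvRec f g p n lo hi).getD k 0
        = ((List.range (hi - lo)).map
            (fun d => if d ≤ k ∧ k - d < n then pvTerm f g p (lo + d) (k - d) else 0)).sum := by
  intro m
  induction m using Nat.strong_induction_on with
  | _ m ih =>
    intro lo hi hm hlt k
    rw [pvRec]
    by_cases h1 : hi - lo ≤ 1
    · rw [if_pos h1]
      have h11 : hi - lo = 1 := by omega
      rw [h11]
      have hbase : ∀ (u : Nat → Int),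
          ((List.range n).map u).getD k 0 = if k < n then u k else 0 := by
        intro u
        rcases Nat.lt_or_ge k n with hkn | hkn
        · rw [if_pos hkn, List.getD_eq_getElem?_getD,
            List.getElem?_eq_getElem (by simpa using hkn)]
          simp
        · rw [if_neg (by omega), List.getD_eq_getElem?_getD,
            List.getElem?_eq_none (by simpa using hkn)]
          rfl
      have hrange1 : (List.range 1) = [0] := rfl
      rw [hrange1]
      simp only [List.map_cons, List.map_nil, List.sum_cons, List.sum_nil, add_zero]
      unfold pvTerm
      split_ifs with hp hk hk
      · rw [hbase]; rw [if_pos (by omega)]; simp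
      · rw [hbase]; rw [if_neg (by omega)]
      · rw [hbase]; rw [if_pos (by omega)]; simp
      · rw [hbase]; rw [if_neg (by omega)]
    · rw [if_neg h1]
      set mid := (lo + hi) / 2 with hmiddef
      have hmid1 : lo < mid := by omega
      have hmid2 : mid < hi := by omega
      have hla := pv_rec_len f g p n (mid - lo) lo mid rfl hmid1
      have hlb := pv_rec_len f g p n (hi - mid) mid hi rfl hmid2
      rw [pv_addAt_getD, pv_getD_append_replicate, List.length_append,
        List.length_replicate, hla, hlb,
        ih (mid - lo) (by omega) lo mid rfl hmid1 k]
      -- split the RHS range sum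
      have hsplit : hi - lo = (mid - lo) + (hi - mid) := by omega
      rw [hsplit, List.range_add, List.map_append, List.sum_append, List.map_map]
      apply congrArg
      -- second summand: the shifted b-part
      by_cases hko : mid - lo ≤ k
      · -- terms correspond under d = (mid-lo) + d'
        have hbval := ih (hi - mid) (by omega) mid hi rfl hmid2 (k - (mid - lo))
        by_cases hin : k - (mid - lo) < (hi - mid) + n - 1
        · rw [if_pos (by constructor; exact hko; constructor; exact hin; omega), hbval]
          apply congrArg
          apply List.map_congr_left
          intro d' hd'
          have hd'2 : d' < hi - mid := List.mem_range.mp hd'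
          simp only [Function.comp]
          by_cases hc : d' ≤ k - (mid - lo) ∧ k - (mid - lo) - d' < n
          · rw [if_pos hc, if_pos (by omega)]
            have e1 : mid + d' = lo + (mid - lo + d') := by omega
            have e2 : k - (mid - lo) - d' = k - (mid - lo + d') := by omega
            rw [e1, e2]
          · rw [if_neg hc, if_neg (by omega)]
        · -- out of range on both sides: gate false, and every term of the sum is 0
          rw [if_neg (by omega)]
          symm
          apply List.sum_eq_zero
          intro x hx
          obtain ⟨d', hd', rfl⟩ := List.mem_map.mp hx
          have hd'2 : d' < hi - mid := List.mem_range.mp hd'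
          simp only [Function.comp]
          rw [if_neg (by omega)]
      · -- k left of the offset: both sides 0
        rw [if_neg (by omega)]
        symm
        apply List.sum_eq_zero
        intro x hx
        obtain ⟨d', hd', rfl⟩ := List.mem_map.mp hx
        simp only [Function.comp]
        rw [if_neg (by omega)]

-- ===== VERDICT (by name: the statement is the Claim_ definition above) =====
theorem Linear_Conv_spec : Claim_equal_Linear_Conv := by
  intro f g p _ _
  unfold Spec_Linear_Conv Linear_Conv Linear_Conv_alt
  simp only []
  by_cases hn : f.length = 0
  · simp [hn]
  · rw [if_neg hn]
    set n := f.length with hndef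
    have hn1 : 1 ≤ n := by omega
    have ht : ∀ i j, (if p ≠ 0 then PySem.Int.mod (f.getD i 0 * g.getD j 0) p
        else f.getD i 0 * g.getD j 0) = pvTerm f g p i j := fun i j => rfl
    have hmain : ∀ (t : Nat → Nat → Int), t = pvTerm f g p →
        ((List.range n).foldl (fun r i => (List.range n).foldl
            (fun r j => r.set (i + j) (r.getD (i + j) 0 + t i j)) r)
          (List.replicate (2 * n - 1) (0 : Int)))
          = pvRec f g p n 0 n := by
      intro t htdef
      apply List.ext_getElem
      · rw [pv_outer_len, List.length_replicate, pv_rec_len f g p n n 0 n rfl (by omega)]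
        omega
      · intro k h1 h2
        have hk : k < 2 * n - 1 := by
          rw [pv_outer_len, List.length_replicate] at h1; exact h1
        have hA := pv_mainA t n k hk
        have hB := pv_rec_getD f g p n n 0 n rfl (by omega) k
        rw [List.getD_eq_getElem?_getD, List.getElem?_eq_getElem h1, Option.getD_some] at hA
        rw [List.getD_eq_getElem?_getD, List.getElem?_eq_getElem h2, Option.getD_some] at hB
        rw [hA, hB]
        apply congrArg
        apply List.map_congr_left
        intro d hd
        simp only [Nat.zero_add, htdef]
    by_cases hp : p ≠ 0
    · rw [if_pos hp]
      apply hmain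
      funext i j
      unfold pvTerm
      rw [if_pos hp]
    · rw [if_neg hp]
      apply hmain
      funext i j
      unfold pvTerm
      rw [if_neg hp]
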